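-- pv_equiv track=rewrite | github.com/bioCKO/Ostrich_Z_polymorphism | get_density_feature.py | GC_count_f
-- ===== SOURCE A (Python) =====
-- def GC_count_f(sequence):
-- 	"""Return heterozygosity from
-- 		any sequence as a string """
-- 	# The first thing is to test the input
-- 	if not isinstance(sequence, str):
-- 		raise Exception("Sequence is not a string")
-- 	homozygote='ATCG'
-- 	GCs='GC'
-- 	homozygote_count = len([base.upper() for base in sequence if base.upper() in homozygote])
-- 	GC_count = len([base.upper() for base in sequence if base.upper() in GCs])
-- 	return homozygote_count, GC_count
-- ===== SOURCE B (Python) =====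
-- def GC_count_f(sequence):
--     """Return heterozygosity from
--         any sequence as a string """
--     if not isinstance(sequence, str):
--         raise Exception("Sequence is not a string")
--     counts = {}
--     for base in sequence:
--         u = base.upper()
--         counts[u] = counts.get(u, 0) + 1
--     homozygote_count = counts.get('A', 0) + counts.get('T', 0) + counts.get('C', 0) + counts.get('G', 0)
--     GC_count = counts.get('G', 0) + counts.get('C', 0)
--     return homozygote_count, GC_count
-- ===== Notes on version B (the rewrite author's own statement) =====
-- stated objective: idiomatic
-- what changed: Replaces A's two filtered comprehension scans over the sequence with a single pass that tabulates uppercased base frequencies in a dict, then derives both counts from four constant-time table lookups.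
import Mathlib
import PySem

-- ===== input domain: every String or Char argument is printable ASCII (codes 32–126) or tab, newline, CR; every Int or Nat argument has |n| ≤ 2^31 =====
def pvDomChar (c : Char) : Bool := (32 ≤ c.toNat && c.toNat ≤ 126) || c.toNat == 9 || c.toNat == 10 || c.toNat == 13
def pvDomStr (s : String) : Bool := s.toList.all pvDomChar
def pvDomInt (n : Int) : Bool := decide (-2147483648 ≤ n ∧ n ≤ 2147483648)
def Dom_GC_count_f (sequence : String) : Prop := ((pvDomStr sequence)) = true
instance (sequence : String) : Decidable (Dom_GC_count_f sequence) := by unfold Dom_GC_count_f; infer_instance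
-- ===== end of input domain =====

-- B tabulates uppercased base frequencies in one pass into a dict and reads both counts
-- from constant-size lookups, instead of A's two filtered comprehension scans (objective: idiomatic).


-- ===== PORT A =====
-- len([base.upper() for base in sequence if base.upper() in homozygote]) and the GC analogue;
-- 'x in str' for the 1-char string base.upper() is PySem.Chars.isIn on the char lists.
def GC_count_f (sequence : String) : Int × Int :=
  let homozygote := "ATCG"
  let GCs := "GC"
  let homozygote_count : Int :=
    (((sequence.toList.filter
        (fun base => PySem.Chars.isIn [PySem.Chars.upperChar base] homozygote.toList)).map
        (fun base => PySem.Chars.upperChar base)).length : Int)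
  let GC_count : Int :=
    (((sequence.toList.filter
        (fun base => PySem.Chars.isIn [PySem.Chars.upperChar base] GCs.toList)).map
        (fun base => PySem.Chars.upperChar base)).length : Int)
  (homozygote_count, GC_count)

-- ===== PORT B =====
-- one pass: counts[u] = counts.get(u, 0) + 1, then four constant lookups
def GC_count_f_alt (sequence : String) : Int × Int :=
  let counts : PySem.Dict Char Int :=
    sequence.toList.foldl
      (fun d base =>
        let u := PySem.Chars.upperChar base
        d.insert u (d.getD u 0 + 1))
      PySem.Dict.empty
  let homozygote_count :=
    counts.getD 'A' 0 + counts.getD 'T' 0 + counts.getD 'C' 0 + counts.getD 'G' 0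
  let GC_count := counts.getD 'G' 0 + counts.getD 'C' 0
  (homozygote_count, GC_count)

-- ===== PRECONDITION & SPEC =====
def Spec_GC_count_f (sequence : String) (out : Int × Int) : Prop := out = GC_count_f_alt sequence
instance (sequence : String) (out : Int × Int) : Decidable (Spec_GC_count_f sequence out) := by unfold Spec_GC_count_f; infer_instance

-- ===== CLAIM (what is proved, stated in full; the proofs are below) =====
def Claim_equal_GC_count_f : Prop := ∀ (sequence : String), Dom_GC_count_f sequence → Spec_GC_count_f sequence (GC_count_f sequence)

-- ===== LEMMAS AND PROOFS =====

-- single-char 'in' over a short literal string is plain membership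
theorem isIn_singleton_ATCG (c : Char) :
    PySem.Chars.isIn [c] ['A','T','C','G'] = (c == 'A' || c == 'T' || c == 'C' || c == 'G') := by
  simp [PySem.Chars.isIn, PySem.Chars.find, PySem.Chars.find.go, List.isPrefixOf]
  by_cases h1 : c = 'A' <;> by_cases h2 : c = 'T' <;> by_cases h3 : c = 'C' <;> by_cases h4 : c = 'G' <;>
    simp_all

theorem isIn_singleton_GC (c : Char) :
    PySem.Chars.isIn [c] ['G','C'] = (c == 'G' || c == 'C') := by
  simp [PySem.Chars.isIn, PySem.Chars.find, PySem.Chars.find.go, List.isPrefixOf]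
  by_cases h1 : c = 'G' <;> by_cases h2 : c = 'C' <;> simp_all

theorem countP_ATCG (l : List Char) :
    ((l.countP (fun b => PySem.Chars.isIn [PySem.Chars.upperChar b] ['A','T','C','G'])) : Int)
      = ((l.map PySem.Chars.upperChar).count 'A' : Int)
        + ((l.map PySem.Chars.upperChar).count 'T' : Int)
        + ((l.map PySem.Chars.upperChar).count 'C' : Int)
        + ((l.map PySem.Chars.upperChar).count 'G' : Int) := by
  have hp : (fun b : Char => PySem.Chars.isIn [PySem.Chars.upperChar b] ['A','T','C','G'])
      = (fun b : Char => PySem.Chars.upperChar b == 'A' || PySem.Chars.upperChar b == 'T'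
          || PySem.Chars.upperChar b == 'C' || PySem.Chars.upperChar b == 'G') :=
    funext fun b => isIn_singleton_ATCG _
  rw [hp]
  induction l with
  | nil => simp
  | cons c t ih =>
    simp only [List.countP_cons, List.map_cons, List.count_cons]
    by_cases h1 : PySem.Chars.upperChar c = 'A' <;>
      by_cases h2 : PySem.Chars.upperChar c = 'T' <;>
        by_cases h3 : PySem.Chars.upperChar c = 'C' <;>
          by_cases h4 : PySem.Chars.upperChar c = 'G' <;>
            simp_all <;> omega

theorem countP_GC (l : List Char) :
    ((l.countP (fun b => PySem.Chars.isIn [PySem.Chars.upperChar b] ['G','C'])) : Int)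
      = ((l.map PySem.Chars.upperChar).count 'G' : Int)
        + ((l.map PySem.Chars.upperChar).count 'C' : Int) := by
  have hp : (fun b : Char => PySem.Chars.isIn [PySem.Chars.upperChar b] ['G','C'])
      = (fun b : Char => PySem.Chars.upperChar b == 'G' || PySem.Chars.upperChar b == 'C') :=
    funext fun b => isIn_singleton_GC _
  rw [hp]
  induction l with
  | nil => simp
  | cons c t ih =>
    simp only [List.countP_cons, List.map_cons, List.count_cons]
    by_cases h1 : PySem.Chars.upperChar c = 'G' <;>
      by_cases h2 : PySem.Chars.upperChar c = 'C' <;>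
        simp_all <;> omega

theorem getD_upper_fold (l : List Char) (v : Char) :
    (l.foldl
        (fun (d : PySem.Dict Char Int) base =>
          d.insert (PySem.Chars.upperChar base) (d.getD (PySem.Chars.upperChar base) 0 + 1))
        PySem.Dict.empty).getD v 0
      = ((l.map PySem.Chars.upperChar).count v : Int) := by
  have h := PySem.Dict.getD_foldl_insert_add_one
    (l := l.map PySem.Chars.upperChar) (d := (PySem.Dict.empty : PySem.Dict Char Int)) (v := v)
  rw [List.foldl_map] at h
  simpa using h

-- ===== VERDICT (by name: the statement is the Claim_ definition above) =====
theorem GC_count_f_spec : Claim_equal_GC_count_f := by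
  intro sequence _
  unfold Spec_GC_count_f GC_count_f GC_count_f_alt
  have hA : "ATCG".toList = ['A','T','C','G'] := rfl
  have hG : "GC".toList = ['G','C'] := rfl
  simp only [hA, hG, getD_upper_fold, List.length_map, Prod.mk.injEq]
  constructor
  · have := countP_ATCG sequence.toList
    simpa [List.countP_eq_length_filter] using this
  · have := countP_GC sequence.toList
    simpa [List.countP_eq_length_filter] using this
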